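-- pv_equiv track=rewrite | github.com/p3nGu1nZz/x-spanformer | x_spanformer/vocab/core.py | is_whitespace_coherent
-- ===== SOURCE A (Python) =====
-- import string
--
-- def is_whitespace_coherent(candidate: str) -> bool:
--     """
--     Check if a candidate maintains whitespace as atomic units.
--
--     Enforces strict whitespace separation using Python's standard string.whitespace
--     definition, which includes: space, tab, newline, carriage return, vertical tab,
--     and form feed. This follows standard tokenization conventions used by other LMs.
--
--     Whitespace sequences must be standalone tokens, never mixed with non-whitespace
--     characters. This treats whitespace like repeated character sequences - always atomic.
--
--     Args:
--         candidate: Candidate substring to validate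
--
--     Returns:
--         True if candidate maintains atomic whitespace separation, False otherwise
--     """
--     if len(candidate) <= 1:
--         return True
--
--     # Use Python's standard whitespace definition (includes all 6 standard whitespace chars)
--     # This matches conventions used by other language models
--     whitespace_chars = set(string.whitespace)  # ' \t\n\r\x0b\x0c'
--
--     # Check if this is a pure whitespace sequence (allowed)
--     all_whitespace = all(c in whitespace_chars for c in candidate)
--     if all_whitespace:
--         return True
--
--     # Check if this is a pure non-whitespace sequence (allowed)
--     no_whitespace = all(c not in whitespace_chars for c in candidate)
--     if no_whitespace:
--         return True
--
--     # Mixed whitespace and non-whitespace is not allowed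
--     # This rejects cases like: " the", "ing ", "a\tb", "\nhello", etc.
--     return False
-- ===== SOURCE B (Python) =====
-- import string
--
--
-- def is_whitespace_coherent(candidate: str) -> bool:
--     """Local boundary scan: a string mixes whitespace with non-whitespace iff
--     somewhere two ADJACENT characters are of different classes.  So scan the
--     consecutive pairs and require each pair to agree on whitespace-ness; empty
--     and length-1 strings have no pairs and are trivially coherent."""
--     ws = set(string.whitespace)
--     return all((x in ws) == (y in ws) for x, y in zip(candidate, candidate[1:]))
-- ===== Notes on version B (the rewrite author's own statement) =====
-- stated objective: alternative
-- what changed: Replaces the length guard plus two global all-whitespace / all-non-whitespace scans by a single local scan over adjacent character pairs: the string is coherent iff no consecutive pair crosses the whitespace/non-whitespace boundary.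
import Mathlib
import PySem

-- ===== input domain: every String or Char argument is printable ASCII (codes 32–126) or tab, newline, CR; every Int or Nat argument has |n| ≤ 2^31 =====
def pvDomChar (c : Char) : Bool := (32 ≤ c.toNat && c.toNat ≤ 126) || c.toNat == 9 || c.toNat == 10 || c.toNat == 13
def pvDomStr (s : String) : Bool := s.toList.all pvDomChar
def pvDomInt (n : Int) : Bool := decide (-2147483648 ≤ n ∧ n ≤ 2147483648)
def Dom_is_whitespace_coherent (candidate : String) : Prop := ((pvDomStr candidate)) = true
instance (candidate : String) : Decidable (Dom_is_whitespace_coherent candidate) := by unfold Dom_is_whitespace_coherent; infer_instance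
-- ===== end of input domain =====

-- B replaces A's length guard plus two global class scans by one local scan over the
-- adjacent character pairs: coherent iff no consecutive pair mixes whitespace with
-- non-whitespace (alternative algorithm; same cost).

-- ===== PORT A =====
-- string.whitespace = ' \t\n\r\x0b\x0c'
def pvWhitespaceChars : PySem.Set Char :=
  PySem.Set.ofList [' ', '\t', '\n', '\r', Char.ofNat 11, Char.ofNat 12]

def is_whitespace_coherent (candidate : String) : Bool :=
  if PySem.Str.len candidate ≤ 1 then true
  else
    let whitespace_chars := pvWhitespaceChars
    let all_whitespace := candidate.toList.all (fun c => whitespace_chars.contains c)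
    if all_whitespace then true
    else
      let no_whitespace := candidate.toList.all (fun c => !whitespace_chars.contains c)
      if no_whitespace then true
      else false

-- ===== PORT B =====
-- zip(candidate, candidate[1:]) : candidate[1:] is the slice from index 1 = the tail
def is_whitespace_coherent_alt (candidate : String) : Bool :=
  let ws := pvWhitespaceChars
  (candidate.toList.zip (PySem.List.slice candidate.toList (some 1) none)).all
    (fun p => ws.contains p.1 == ws.contains p.2)

-- ===== PRECONDITION & SPEC =====
def Spec_is_whitespace_coherent (candidate : String) (out : Bool) : Prop := out = is_whitespace_coherent_alt candidate
instance (candidate : String) (out : Bool) : Decidable (Spec_is_whitespace_coherent candidate out) := by unfold Spec_is_whitespace_coherent; infer_instance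

-- ===== CLAIM (what is proved, stated in full; the proofs are below) =====
def Claim_equal_is_whitespace_coherent : Prop := ∀ (candidate : String), Dom_is_whitespace_coherent candidate → Spec_is_whitespace_coherent candidate (is_whitespace_coherent candidate)

-- ===== LEMMAS AND PROOFS =====

-- slice [1:] is the tail
theorem pv_slice_one {α : Type} (l : List α) :
    PySem.List.slice l (some 1) none = l.tail := by
  exact PySem.List.slice_from_one l

-- adjacent-pair agreement of g along l  =  (l is all-g or all-not-g)
theorem pv_chain (g : Char → Bool) (l : List Char) :
    (l.zip l.tail).all (fun p => g p.1 == g p.2)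
      = (l.all g || l.all (fun c => !g c)) := by
  induction l with
  | nil => simp
  | cons c t ih =>
    cases t with
    | nil => cases h : g c <;> simp [h]
    | cons d t' =>
      simp only [List.tail_cons, List.zip_cons_cons, List.all_cons, ih]
      cases h1 : g c <;> cases h2 : g d <;>
        simp only [h1, h2, beq_self_eq_true, Bool.true_and, beq_iff_eq, Bool.false_eq_true,
          Bool.false_and, List.all_cons, Bool.not_true, Bool.not_false] <;>
        simp [h1, h2, List.all_eq_true]
      · simp only [List.tail_cons] at ih; rw [ih]; simp [h2]
      · simp only [List.tail_cons] at ih; rw [ih]; simp [h2]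

theorem pv_key (l : List Char) :
    (if (l.length : Int) ≤ 1 then true
     else if l.all (fun c => pvWhitespaceChars.contains c) then true
     else if l.all (fun c => !pvWhitespaceChars.contains c) then true
     else false)
    = (l.zip l.tail).all
        (fun p => pvWhitespaceChars.contains p.1 == pvWhitespaceChars.contains p.2) := by
  rw [pv_chain]
  match l with
  | [] => simp
  | [c] => cases h : pvWhitespaceChars.contains c <;> simp [h]
  | c :: d :: t =>
    have : ¬ ((c :: d :: t).length : Int) ≤ 1 := by
      simp only [List.length_cons]; omega
    rw [if_neg this]
    cases h1 : (c :: d :: t).all (fun c => pvWhitespaceChars.contains c) <;>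
      cases h2 : (c :: d :: t).all (fun c => !pvWhitespaceChars.contains c) <;> simp [h1, h2]

-- ===== VERDICT (by name: the statement is the Claim_ definition above) =====
theorem is_whitespace_coherent_spec : Claim_equal_is_whitespace_coherent := by
  intro candidate _
  unfold Spec_is_whitespace_coherent is_whitespace_coherent is_whitespace_coherent_alt
  rw [pv_slice_one]
  simpa [PySem.Str.len_eq] using pv_key candidate.toList
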